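-- pv_equiv track=rewrite | github.com/eakravtsov/name_matcher | compound_matcher.py | _generate_splits
-- ===== SOURCE A (Python) =====
-- import itertools
--
-- def _generate_splits(token, parts):
--     """Generates all ways to split `token` into `parts` non-empty substrings."""
--     if len(token) < parts:
--         return []
--     splits = []
--     for split_indices in itertools.combinations(range(1, len(token)), parts - 1):
--         parts_list = []
--         last_idx = 0
--         for idx in split_indices:
--             parts_list.append(token[last_idx:idx])
--             last_idx = idx
--         parts_list.append(token[last_idx:])
--         splits.append(parts_list)
--     return splits
-- ===== SOURCE B (Python) =====
-- def _generate_splits(token, parts):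
--     """Generates all ways to split `token` into `parts` non-empty substrings."""
--     if parts <= 0 or len(token) < parts:
--         return []
--     if parts == 1:
--         return [[token]]
--     return [[token[:i]] + rest
--             for i in range(1, len(token) - parts + 2)
--             for rest in _generate_splits(token[i:], parts - 1)]
-- ===== Notes on version B (the rewrite author's own statement) =====
-- stated objective: alternative
-- what changed: Replaces itertools.combinations over cut indices plus an index-fold that slices the token with a direct structural recursion on (token, parts) that peels the first piece and recurses on the suffix, producing the same increasing-first-piece order.
import Mathlib
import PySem

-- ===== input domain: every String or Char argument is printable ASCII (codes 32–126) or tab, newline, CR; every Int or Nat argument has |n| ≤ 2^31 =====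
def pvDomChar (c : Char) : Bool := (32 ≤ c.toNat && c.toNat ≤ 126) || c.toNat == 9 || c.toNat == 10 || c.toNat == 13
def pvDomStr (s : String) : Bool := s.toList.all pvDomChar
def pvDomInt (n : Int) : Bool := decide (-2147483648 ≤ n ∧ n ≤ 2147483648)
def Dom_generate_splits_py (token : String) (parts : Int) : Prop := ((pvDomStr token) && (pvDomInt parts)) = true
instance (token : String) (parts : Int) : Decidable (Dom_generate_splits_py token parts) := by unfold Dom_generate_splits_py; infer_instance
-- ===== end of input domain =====

-- B changes the decomposition (direct recursion on the token instead of combinations of cut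
-- indices); equal output on parts ≥ 1; not claimed faster.

-- ===== PORT A =====
-- itertools.combinations(range(b, n), r) in lexicographic order (library call of A):
-- for r ≥ 1 the first chosen element i ranges over [b, n-r+1) and the rest are combinations of (i, n).
def pvCombos (b n : Int) : Nat → List (List Int)
  | 0 => [[]]
  | r + 1 =>
      (PySem.List.pyRange b (n - r) 1).flatMap fun i =>
        (pvCombos (i + 1) n r).map (fun t => i :: t)

def generate_splits_py (token : String) (parts : Int) : List (List String) :=
  let n : Int := (PySem.Str.len token : Int)
  if n < parts then []
  else
    (pvCombos 1 n (parts - 1).toNat).map (fun split_indices =>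
      let st := split_indices.foldl
        (fun (st : List String × Int) idx =>
          (st.1 ++ [PySem.Str.slice token (some st.2) (some idx)], idx)) ([], 0)
      st.1 ++ [PySem.Str.slice token (some st.2) none])

-- ===== PORT B =====
def pvAltSplits (cs : List Char) : Nat → List (List String)
  | 0 => []                                   -- parts <= 0 guard
  | 1 => if cs.length < 1 then [] else [[String.ofList cs]]
  | (r + 2) =>
      if cs.length < r + 2 then []
      else
        (List.range' 1 (cs.length - (r + 2) + 1)).flatMap fun i =>
          (pvAltSplits (cs.drop i) (r + 1)).map (fun rest => String.ofList (cs.take i) :: rest)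

def generate_splits_py_alt (token : String) (parts : Int) : List (List String) :=
  pvAltSplits token.toList parts.toNat

-- ===== PRECONDITION & SPEC =====
-- Pre_ excludes parts ≤ 0, where A raises ValueError (combinations with negative r).
def Pre_generate_splits_py (token : String) (parts : Int) : Prop := 1 ≤ parts
instance (token : String) (parts : Int) : Decidable (Pre_generate_splits_py token parts) := by
  unfold Pre_generate_splits_py; infer_instance

def pvWitness_generate_splits_py : String × Int := ("abcd", 2)

def Spec_generate_splits_py (token : String) (parts : Int) (out : List (List String)) : Prop := out = generate_splits_py_alt token parts
instance (token : String) (parts : Int) (out : List (List String)) : Decidable (Spec_generate_splits_py token parts out) := by unfold Spec_generate_splits_py; infer_instance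

-- ===== CLAIM (what is proved, stated in full; the proofs are below) =====
def Claim_equal_generate_splits_py : Prop := ∀ (token : String) (parts : Int), Dom_generate_splits_py token parts → Pre_generate_splits_py token parts → Spec_generate_splits_py token parts (generate_splits_py token parts)

-- ===== LEMMAS AND PROOFS =====

-- strings are equal when their character lists are
theorem pvStrEq (s t : String) (h : s.toList = t.toList) : s = t := by
  rw [← String.ofList_toList (s := s), ← String.ofList_toList (s := t), h]

-- B's recursion returns [] whenever the token is shorter than the number of parts
theorem pvAlt_nil (cs : List Char) (p : Nat) (h : cs.length < p) : pvAltSplits cs p = [] := by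
  match p with
  | 0 => omega
  | 1 => simp [pvAltSplits, h]
  | r + 2 => simp [pvAltSplits, h]

-- the A-side piece builder, unfolded from the foldl
def pvPieces (token : String) (a : Int) : List Int → List String
  | [] => [PySem.Str.slice token (some a) none]
  | i :: rest => PySem.Str.slice token (some a) (some i) :: pvPieces token i rest

theorem pvFoldl_pieces (token : String) (idxs : List Int) (acc : List String) (a : Int) :
    (idxs.foldl (fun (st : List String × Int) idx =>
        (st.1 ++ [PySem.Str.slice token (some st.2) (some idx)], idx)) (acc, a)).1
      ++ [PySem.Str.slice token
            (some (idxs.foldl (fun (st : List String × Int) idx =>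
              (st.1 ++ [PySem.Str.slice token (some st.2) (some idx)], idx)) (acc, a)).2) none]
    = acc ++ pvPieces token a idxs := by
  induction idxs generalizing acc a with
  | nil => simp [pvPieces]
  | cons i rest ih =>
    simp only [List.foldl_cons]
    rw [ih]
    simp [pvPieces]

theorem pvFoldl_pieces0 (token : String) (si : List Int) :
    (si.foldl (fun (st : List String × Int) idx =>
        (st.1 ++ [PySem.Str.slice token (some st.2) (some idx)], idx)) ([], 0)).1
      ++ [PySem.Str.slice token
            (some (si.foldl (fun (st : List String × Int) idx =>
              (st.1 ++ [PySem.Str.slice token (some st.2) (some idx)], idx)) ([], 0)).2) none]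
    = pvPieces token 0 si := by
  simpa using pvFoldl_pieces token si [] 0

-- main correspondence: combinations of cut indices in (a, n) built into pieces starting at a
-- equal B's recursion on the suffix of the token starting at a
theorem pvMain (token : String) (r : Nat) :
    ∀ (a : Nat), a + r + 1 ≤ token.toList.length →
    (pvCombos ((a : Int) + 1) ((token.toList.length : Nat) : Int) r).map (pvPieces token (a : Int))
      = pvAltSplits (token.toList.drop a) (r + 1) := by
  induction r with
  | zero =>
    intro a h
    have hneg : ¬ ((token.toList.drop a).length < 1) := by
      simp only [List.length_drop]; omega
    simp only [pvCombos, List.map_cons, List.map_nil, pvPieces, pvAltSplits, if_neg hneg]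
    refine congrArg (fun s => [[s]]) (pvStrEq _ _ ?_)
    simp [PySem.List.slice_from_natCast]
  | succ r ih =>
    intro a h
    have hlend : (token.toList.drop a).length = token.toList.length - a := by
      simp
    have hm : (((token.toList.length : Nat) : Int) - (r : Int) - ((a : Int) + 1)).toNat
        = token.toList.length - a - r - 1 := by omega
    simp only [pvCombos, pvAltSplits, PySem.List.pyRange_one, hm, hlend,
      List.range'_eq_map_range, List.map_flatMap, List.flatMap_map]
    rw [if_neg (show ¬ (token.toList.length - a < r + 2) by omega),
      show token.toList.length - a - (r + 2) + 1 = token.toList.length - a - r - 1 from by omega]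
    refine congrArg List.flatten (List.map_congr_left ?_)
    intro k hk
    rw [List.mem_range] at hk
    have e1 : ((a : Int) + 1 + (k : Int)) = (((a + k + 1 : Nat) : Nat) : Int) := by
      push_cast; ring
    rw [e1, List.map_map]
    have e2 : (pvPieces token ((a : Nat) : Int)) ∘ (fun t => (((a + k + 1 : Nat) : Nat) : Int) :: t)
        = fun t => PySem.Str.slice token (some ((a : Nat) : Int)) (some (((a + k + 1 : Nat) : Nat) : Int))
            :: pvPieces token (((a + k + 1 : Nat) : Nat) : Int) t := by
      funext t; simp [Function.comp, pvPieces]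
    rw [e2]
    have e3 : (fun t => PySem.Str.slice token (some ((a : Nat) : Int)) (some (((a + k + 1 : Nat) : Nat) : Int))
            :: pvPieces token (((a + k + 1 : Nat) : Nat) : Int) t)
        = (fun l => PySem.Str.slice token (some ((a : Nat) : Int)) (some (((a + k + 1 : Nat) : Nat) : Int)) :: l)
            ∘ pvPieces token (((a + k + 1 : Nat) : Nat) : Int) := rfl
    rw [e3, ← List.map_map, ih (a + k + 1) (by omega)]
    rw [List.drop_drop]
    have e4 : a + (1 + k) = a + k + 1 := by omega
    rw [e4]
    refine List.map_congr_left (fun rest _ => ?_)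
    refine congrArg (fun s => s :: rest) (pvStrEq _ _ ?_)
    simp only [PySem.Str.toList_slice, PySem.Chars.slice_eq_listSlice,
      PySem.List.slice_natCast, String.toList_ofList]
    rw [show a + k + 1 - a = 1 + k from by omega]

-- ===== VERDICT (by name: the statement is the Claim_ definition above) =====
theorem generate_splits_py_spec : Claim_equal_generate_splits_py := by
  intro token parts _ hpre
  unfold Pre_generate_splits_py at hpre
  unfold Spec_generate_splits_py generate_splits_py generate_splits_py_alt
  have hlen : PySem.Str.len token = ((token.toList.length : Nat) : Int) := by
    simp [pysem]
  simp only [hlen]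
  by_cases hlt : ((token.toList.length : Nat) : Int) < parts
  · rw [if_pos hlt]
    exact (pvAlt_nil _ _ (by omega)).symm
  · rw [if_neg hlt]
    have hr : parts.toNat = (parts - 1).toNat + 1 := by omega
    rw [hr]
    have hmain := pvMain token (parts - 1).toNat 0 (by omega)
    simp only [Nat.cast_zero, zero_add, List.drop_zero] at hmain
    rw [← hmain]
    simp only [pvFoldl_pieces0]
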